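-- pv_equiv track=rewrite | github.com/twoong01/my_study | 프로그래머스/unrated/258712. 가장 많이 받은 선물/가장 많이 받은 선물.py | solution
-- ===== SOURCE A (Python) =====
-- def solution(friends, gifts):
--     answer = 0
--     dic = {f:i for i, f in enumerate(friends)}
--     gift_table = [[0 for _ in range(len(friends))] for _ in range(len(friends))]
--     presents = [0] * len(friends)
--
--     # 선물 주고 받은 테이블
--     for gift in gifts:
--         give, take = gift.split()
--         gift_table[dic[give]][dic[take]] += 1
--
--     # 선물 지수
--     gift_rate = []
--     for i in range(len(friends)):
--         row = sum(gift_table[i])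
--         col = 0
--         for j in range(len(friends)):
--             col += gift_table[j][i]
--         gift_rate.append(row - col)
--
--     for i in range(len(friends)):
--         for j in range(i + 1, len(friends)):
--             if gift_table[i][j] > gift_table[j][i]:
--                 presents[i] += 1
--             elif gift_table[i][j] < gift_table[j][i]:
--                 presents[j] += 1
--             else:
--                 if gift_rate[i] > gift_rate[j]:
--                     presents[i] += 1
--                 elif gift_rate[i] < gift_rate[j]:
--                     presents[j] += 1
--     answer = max(presents)
--     return answer
-- ===== SOURCE B (Python) =====
-- def solution(friends, gifts):
--     # Parse each gift once into a (giver, taker) pair.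
--     pairs = []
--     for g in gifts:
--         a, b = g.split()
--         pairs.append((a, b))
--
--     def rate(x):
--         # gift index: gifts given minus gifts received
--         return sum(a == x for a, b in pairs) - sum(b == x for a, b in pairs)
--
--     best = 0
--     for i, a in enumerate(friends):
--         wins = 0
--         for j, b in enumerate(friends):
--             if j != i:
--                 ab = pairs.count((a, b))
--                 ba = pairs.count((b, a))
--                 if ab > ba or (ab == ba and rate(a) > rate(b)):
--                     wins += 1
--         best = max(best, wins)
--     return best
-- ===== Notes on version B (the rewrite author's own statement) =====
-- stated objective: alternative
-- what changed: B drops A's name-to-index dict, N x N gift matrix, nested column-summation loop and presents array: it parses gifts once into (giver, taker) pairs and, for each friend, counts wins against all other friends directly from pair counts and a give-minus-receive gift index, keeping a running maximum.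
-- outside the precondition, e.g. on solution(['a', 'a', 'b'], ['a b']): A returns 2, B returns 1
import Mathlib
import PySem

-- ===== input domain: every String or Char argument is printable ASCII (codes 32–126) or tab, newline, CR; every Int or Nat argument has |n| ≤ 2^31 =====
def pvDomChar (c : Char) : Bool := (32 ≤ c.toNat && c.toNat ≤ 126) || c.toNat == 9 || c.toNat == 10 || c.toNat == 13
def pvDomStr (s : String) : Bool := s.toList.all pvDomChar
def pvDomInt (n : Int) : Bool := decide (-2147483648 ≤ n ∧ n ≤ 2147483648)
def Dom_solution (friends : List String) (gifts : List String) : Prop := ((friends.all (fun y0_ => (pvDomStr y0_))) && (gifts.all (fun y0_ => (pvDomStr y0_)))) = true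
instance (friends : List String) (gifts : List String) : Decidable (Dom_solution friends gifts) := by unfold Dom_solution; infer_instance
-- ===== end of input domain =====

-- B replaces A's name→index dict, N×N count matrix and presents array by direct
-- counting over the once-parsed (giver, taker) pairs with a running maximum
-- of per-friend win counts (objective: alternative decomposition, no speed claim).

-- ===== PORT A =====
def solution (friends : List String) (gifts : List String) : Int :=
  let n : Int := PySem.List.len friends
  let dic : PySem.Dict String Int :=
    (PySem.List.enumerate friends 0).foldl (fun d p => d.insert p.2 p.1) ∅
  let table0 : List (List Int) :=
    (PySem.List.pyRange 0 n 1).map (fun _ => (PySem.List.pyRange 0 n 1).map (fun _ => (0 : Int)))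
  let presents0 : List Int := PySem.List.pyRepeat [(0 : Int)] n
  let table : List (List Int) := gifts.foldl (fun t g =>
      match PySem.Str.split₀ g with
      | [give, take] =>
        let gi := dic.getD give 0      -- dic[give]: KeyError (give ∉ dic) is outside Pre_
        let ti := dic.getD take 0
        let row := PySem.List.pyGetD t gi []
        PySem.List.pySetD t gi (PySem.List.pySetD row ti (PySem.List.pyGetD row ti 0 + 1))
      | _ => t) table0                 -- unpacking ValueError path: outside Pre_
  let rate : List Int := (PySem.List.pyRange 0 n 1).foldl (fun r i =>
      let row := (PySem.List.pyGetD table i []).sum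
      let col := (PySem.List.pyRange 0 n 1).foldl
        (fun c j => c + PySem.List.pyGetD (PySem.List.pyGetD table j []) i 0) 0
      r ++ [row - col]) []
  let presents : List Int := (PySem.List.pyRange 0 n 1).foldl (fun p i =>
      (PySem.List.pyRange (i + 1) n 1).foldl (fun p j =>
        let tij := PySem.List.pyGetD (PySem.List.pyGetD table i []) j 0
        let tji := PySem.List.pyGetD (PySem.List.pyGetD table j []) i 0
        if tij > tji then PySem.List.pySetD p i (PySem.List.pyGetD p i 0 + 1)
        else if tij < tji then PySem.List.pySetD p j (PySem.List.pyGetD p j 0 + 1)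
        else
          let ri := PySem.List.pyGetD rate i 0
          let rj := PySem.List.pyGetD rate j 0
          if ri > rj then PySem.List.pySetD p i (PySem.List.pyGetD p i 0 + 1)
          else if ri < rj then PySem.List.pySetD p j (PySem.List.pyGetD p j 0 + 1)
          else p) p) presents0
  (PySem.List.max? presents (fun x => x)).getD 0   -- max([]) ValueError: outside Pre_

-- ===== PORT B =====
def solution_alt (friends : List String) (gifts : List String) : Int :=
  let pairs : List (String × String) := gifts.foldl (fun ps g =>
      let ts := PySem.Str.split₀ g
      if ts.length = 2 then ps ++ [(ts.getD 0 "", ts.getD 1 "")]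
      else ps) []                      -- unpacking ValueError path: outside Pre_
  let rate : String → Int := fun x =>
    (pairs.map (fun p => if p.1 == x then (1 : Int) else 0)).sum
      - (pairs.map (fun p => if p.2 == x then (1 : Int) else 0)).sum
  (PySem.List.enumerate friends 0).foldl (fun best q =>
    let i := q.1
    let a := q.2
    let wins := (PySem.List.enumerate friends 0).foldl (fun w q' =>
      let j := q'.1
      let b := q'.2
      if j ≠ i then
        let ab : Int := PySem.List.count pairs (a, b)
        let ba : Int := PySem.List.count pairs (b, a)
        if ab > ba ∨ (ab = ba ∧ rate a > rate b) then w + 1 else w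
      else w) (0 : Int)
    max best wins) 0

-- ===== PRECONDITION & SPEC =====
-- Pre_ excludes (besides A's raise paths: empty friends → ValueError on max([]),
-- malformed gifts → ValueError/KeyError) the lists with DUPLICATE friend names, on
-- which A's winner bookkeeping through the last-occurrence name→index dict is
-- accidental (the earlier duplicate keeps an all-zero row and a zero gift index).
def Pre_solution (friends : List String) (gifts : List String) : Prop :=
  friends ≠ [] ∧ friends.Nodup ∧
  ∀ g ∈ gifts, (PySem.Str.split₀ g).length = 2 ∧ ∀ t ∈ PySem.Str.split₀ g, t ∈ friends
instance (friends : List String) (gifts : List String) : Decidable (Pre_solution friends gifts) := by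
  unfold Pre_solution; infer_instance

def pvWitness_solution : List String × List String := (["muzi", "ryan"], ["muzi ryan", "ryan muzi", "muzi ryan"])

def Spec_solution (friends : List String) (gifts : List String) (out : Int) : Prop :=
  out = solution_alt friends gifts
instance (friends : List String) (gifts : List String) (out : Int) : Decidable (Spec_solution friends gifts out) := by
  unfold Spec_solution; infer_instance

-- ===== CLAIM (what is proved, stated in full; the proofs are below) =====
def Claim_equal_solution : Prop := ∀ (friends : List String) (gifts : List String),
  Dom_solution friends gifts → Pre_solution friends gifts → Spec_solution friends gifts (solution friends gifts)

-- ===== LEMMAS AND PROOFS =====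

-- parsed (giver, taker) pairs, the gift index, and the 'x beats y' relation
def pvParse (g : String) : String × String :=
  ((PySem.Str.split₀ g).getD 0 "", (PySem.Str.split₀ g).getD 1 "")
def pvP (gifts : List String) : List (String × String) := gifts.map pvParse
def pvR (P : List (String × String)) (x : String) : Int :=
  (P.countP (fun p => p.1 == x) : Int) - (P.countP (fun p => p.2 == x) : Int)
abbrev pvBt (P : List (String × String)) (x y : String) : Prop :=
  (P.count (y, x) : Int) < P.count (x, y) ∨
  ((P.count (x, y) : Int) = P.count (y, x) ∧ pvR P y < pvR P x)
-- per-friend win count and the common normal form of both programs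
def pvW (friends : List String) (P : List (String × String)) (k : Nat) : Nat :=
  (List.range friends.length).countP
    (fun j => decide (j ≠ k) && decide (pvBt P (friends.getD k "") (friends.getD j "")))
def pvNF (friends : List String) (P : List (String × String)) : Int :=
  (List.range friends.length).foldl (fun b k => max b (pvW friends P k : Int)) 0
-- the in-place update a gift performs on A's count matrix
def pvUpd (t : List (List Int)) (gi ti : Nat) : List (List Int) :=
  PySem.List.pySetD t ↑gi (PySem.List.pySetD (PySem.List.pyGetD t ↑gi [])
    ↑ti (PySem.List.pyGetD (PySem.List.pyGetD t ↑gi []) ↑ti 0 + 1))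
-- one pairwise comparison of A, as a pure step on the presents list
def pvStep (friends : List String) (P : List (String × String)) (p : List Int) (i j : Nat) : List Int :=
  if pvBt P (friends.getD i "") (friends.getD j "") then
    PySem.List.pySetD p ↑i (PySem.List.pyGetD p ↑i 0 + 1)
  else if pvBt P (friends.getD j "") (friends.getD i "") then
    PySem.List.pySetD p ↑j (PySem.List.pyGetD p ↑j 0 + 1)
  else p
-- the index pairs (i, j), i < j < N, in A's iteration order
def pvPairs (N : Nat) : List (Nat × Nat) :=
  (List.range N).flatMap (fun k => (List.range (N - (k+1))).map (fun t => (k, k+1+t)))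
def pvPred (friends : List String) (P : List (String × String)) (k : Nat) : Nat × Nat → Bool :=
  fun ij => (decide (ij.1 = k) && decide (pvBt P (friends.getD ij.1 "") (friends.getD ij.2 ""))) ||
            (decide (ij.2 = k) && decide (pvBt P (friends.getD ij.2 "") (friends.getD ij.1 "")))
-- A's final count matrix, in closed form
def pvTbl (friends : List String) (P : List (String × String)) : List (List Int) :=
  (List.range friends.length).map (fun i =>
    (List.range friends.length).map (fun j =>
      (P.count (friends.getD i "", friends.getD j "") : Int)))

theorem pvPairs_eq (gifts : List String)
    (hg : ∀ g ∈ gifts, (PySem.Str.split₀ g).length = 2) :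
    gifts.foldl (fun ps g =>
      let ts := PySem.Str.split₀ g
      if ts.length = 2 then ps ++ [(ts.getD 0 "", ts.getD 1 "")]
      else ps) [] = pvP gifts := by
  rw [PySem.List.foldl_congr_mem gifts _ (fun ps g => ps ++ [pvParse g]) []]
  · exact PySem.List.foldl_append_singleton_eq_map pvParse gifts []
  · intro acc g hgm
    simp only [if_pos (hg g hgm)]
    rfl

theorem pvB_eq_NF (friends gifts : List String)
    (hg : ∀ g ∈ gifts, (PySem.Str.split₀ g).length = 2) :
    solution_alt friends gifts = pvNF friends (pvP gifts) := by
  unfold solution_alt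
  rw [pvPairs_eq gifts hg]
  rw [PySem.List.enumerate_eq_map_pyRange friends ""]
  simp only [PySem.List.len_eq, PySem.List.pyRange_zero_nat, List.map_map, List.foldl_map,
    Function.comp, PySem.List.pyGetD_natCast, PySem.List.sum_map_ite_one_zero]
  unfold pvNF
  apply PySem.List.foldl_congr_mem
  intro best k _hk
  congr 1
  rw [PySem.List.foldl_congr_mem (List.range friends.length) _
    (fun w j => if (decide (j ≠ k) && decide (pvBt (pvP gifts) (friends.getD k "") (friends.getD j ""))) = true then w + 1 else w) 0]
  · rw [PySem.List.foldl_count_if]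
    simp [pvW]
  · intro w j _hj
    by_cases hjk : j = k
    · simp [hjk]
    · have : (j : Int) ≠ (k : Int) := by exact_mod_cast hjk
      simp only [this, if_true, ne_eq, hjk, not_false_eq_true, decide_true, Bool.true_and]
      by_cases hb : pvBt (pvP gifts) (friends.getD k "") (friends.getD j "")
      · rw [if_pos, decide_eq_true hb, if_pos rfl]
        exact hb
      · rw [if_neg, decide_eq_false hb]; simp
        exact hb

theorem pvBt_asymm (P : List (String × String)) (x y : String) (h : pvBt P x y) : ¬ pvBt P y x := by
  unfold pvBt at *; omega

theorem pvDic_not_mem (fs : List String) (s : Int) (d : PySem.Dict String Int) (x : String)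
    (hx : x ∉ fs) :
    ((PySem.List.enumerate fs s).foldl (fun d p => d.insert p.2 p.1) d).getD x 0 = d.getD x 0 := by
  induction fs generalizing s d with
  | nil => simp [PySem.List.enumerate]
  | cons f t ih =>
    rw [PySem.List.enumerate_cons, List.foldl_cons, ih _ _ (fun h => hx (List.mem_cons_of_mem _ h))]
    rw [PySem.Dict.getD_insert]
    simp only [List.mem_cons, not_or] at hx
    simp [hx.1]

theorem pvDic_mem (fs : List String) (s : Int) (d : PySem.Dict String Int) (x : String)
    (hnd : fs.Nodup) (hx : x ∈ fs) :
    ((PySem.List.enumerate fs s).foldl (fun d p => d.insert p.2 p.1) d).getD x 0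
      = s + (fs.idxOf x : Int) := by
  induction fs generalizing s d with
  | nil => simp at hx
  | cons f t ih =>
    rw [PySem.List.enumerate_cons, List.foldl_cons]
    rcases List.mem_cons.mp hx with h | h
    · subst h
      have hxt : x ∉ t := (List.nodup_cons.mp hnd).1
      rw [pvDic_not_mem t _ _ x hxt, PySem.Dict.getD_insert]
      simp
    · by_cases hfx : x = f
      · subst hfx
        have hxt : x ∉ t := (List.nodup_cons.mp hnd).1
        exact absurd h hxt
      · rw [ih _ _ (List.nodup_cons.mp hnd).2 h, List.idxOf_cons]
        have : (f == x) = false := by simp [Ne.symm hfx]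
        simp [this]
        ring

theorem pvIdx_lt (friends : List String) (a : String) (ha : a ∈ friends) :
    friends.idxOf a < friends.length := List.idxOf_lt_length_of_mem ha

theorem pvF_idx (friends : List String) (a : String) (ha : a ∈ friends) :
    friends.getD (friends.idxOf a) "" = a := by
  rw [List.getD_eq_getElem _ _ (pvIdx_lt friends a ha)]
  exact List.getElem_idxOf _

theorem pvIdx_eq_iff (friends : List String) (hnd : friends.Nodup) (a : String) (ha : a ∈ friends)
    (i : Nat) (hi : i < friends.length) :
    friends.getD i "" = a ↔ i = friends.idxOf a := by
  constructor
  · intro h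
    apply hnd.getElem_inj_iff.mp
    rw [List.getD_eq_getElem _ _ hi] at h
    rw [h, List.getElem_idxOf (pvIdx_lt friends a ha)]
  · intro h; subst h; exact pvF_idx friends a ha

theorem pvMapRange (friends : List String) :
    (List.range friends.length).map (fun j => friends.getD j "") = friends := by
  apply List.ext_getElem
  · simp
  · intro i h1 h2
    simp [List.getD_eq_getElem?_getD, List.getElem?_eq_getElem h2]

theorem pvOcc (friends : List String) (hnd : friends.Nodup) (b : String) (hb : b ∈ friends) :
    ((List.range friends.length).map
      (fun j => if friends.getD j "" == b then (1 : Int) else 0)).sum = 1 := by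
  have h1 : (List.range friends.length).map (fun j => if friends.getD j "" == b then (1:Int) else 0)
      = ((List.range friends.length).map (fun j => friends.getD j "")).map
          (fun s => if s == b then (1:Int) else 0) := by
    simp [List.map_map, Function.comp]
  rw [h1, pvMapRange, PySem.List.sum_map_ite_one_zero]
  have : friends.countP (fun s => s == b) = friends.count b := rfl
  rw [this, List.count_eq_one_of_mem hnd hb]
  simp

theorem pvCountCons (t : List (String × String)) (a b x y : String) :
    (((a, b) :: t).count (x, y) : Int)
      = (t.count (x, y) : Int) + (if a = x ∧ y = b then (1 : Int) else 0) := by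
  simp only [List.count_cons, beq_iff_eq, Prod.mk.injEq]
  have hsymm : (b = y) ↔ (y = b) := eq_comm
  by_cases h1 : a = x <;> by_cases h2 : y = b <;>
    simp [h1, h2, hsymm]

theorem pvSumCountFst (friends : List String) (hnd : friends.Nodup) (x : String) :
    ∀ (P : List (String × String)), (∀ p ∈ P, p.2 ∈ friends) →
    ((List.range friends.length).map (fun j => (P.count (x, friends.getD j "") : Int))).sum
      = (P.countP (fun p => p.1 == x) : Int) := by
  intro P
  induction P with
  | nil => simp
  | cons q t ih =>
    intro hP
    obtain ⟨a, b⟩ := q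
    have hb : b ∈ friends := hP (a, b) List.mem_cons_self
    have hstep : (List.range friends.length).map
        (fun j => (((a, b) :: t).count (x, friends.getD j "") : Int))
        = (List.range friends.length).map (fun j => (t.count (x, friends.getD j "") : Int)
            + (if a = x ∧ friends.getD j "" = b then (1:Int) else 0)) := by
      apply List.map_congr_left
      intro j _
      exact pvCountCons t a b x (friends.getD j "")
    rw [hstep, PySem.List.sum_map_add_int, ih (fun p hp => hP p (List.mem_cons_of_mem _ hp))]
    rw [List.countP_cons]
    by_cases hax : a = x
    · subst hax
      have h2 : (List.range friends.length).map (fun j => if a = a ∧ friends.getD j "" = b then (1:Int) else 0)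
          = (List.range friends.length).map (fun j => if friends.getD j "" == b then (1:Int) else 0) := by
        apply List.map_congr_left; intro j _
        by_cases h : friends.getD j "" = b <;> simp [h]
      rw [h2, pvOcc friends hnd b hb]
      simp only [beq_self_eq_true, if_true]
      push_cast
      ring
    · have h2 : (List.range friends.length).map (fun j => if a = x ∧ friends.getD j "" = b then (1:Int) else 0)
          = (List.range friends.length).map (fun _ => (0:Int)) := by
        apply List.map_congr_left; intro j _
        simp [hax]
      rw [h2]
      have h3 : ((a == x) = false) := beq_eq_false_iff_ne.mpr hax
      simp [h3]

theorem pvOccEq' (friends : List String) (hnd : friends.Nodup) (b : String) (hb : b ∈ friends) :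
    ((List.range friends.length).map
      (fun j => if b = friends.getD j "" then (1 : Int) else 0)).sum = 1 := by
  have h : (List.range friends.length).map (fun j => if b = friends.getD j "" then (1:Int) else 0)
      = (List.range friends.length).map (fun j => if friends.getD j "" == b then (1:Int) else 0) := by
    apply List.map_congr_left; intro j _
    by_cases hh : friends.getD j "" = b
    · rw [if_pos hh.symm, if_pos (beq_iff_eq.mpr hh)]
    · rw [if_neg (fun he => hh he.symm), if_neg (by simpa using hh)]
  rw [h]
  exact pvOcc friends hnd b hb

theorem pvSumCountSnd (friends : List String) (hnd : friends.Nodup) (x : String) :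
    ∀ (P : List (String × String)), (∀ p ∈ P, p.1 ∈ friends) →
    ((List.range friends.length).map (fun j => (P.count (friends.getD j "", x) : Int))).sum
      = (P.countP (fun p => p.2 == x) : Int) := by
  intro P
  induction P with
  | nil => simp
  | cons q t ih =>
    intro hP
    obtain ⟨a, b⟩ := q
    have ha : a ∈ friends := hP (a, b) List.mem_cons_self
    have hstep : (List.range friends.length).map
        (fun j => (((a, b) :: t).count (friends.getD j "", x) : Int))
        = (List.range friends.length).map (fun j => (t.count (friends.getD j "", x) : Int)
            + (if a = friends.getD j "" ∧ x = b then (1:Int) else 0)) := by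
      apply List.map_congr_left
      intro j _
      exact pvCountCons t a b (friends.getD j "") x
    rw [hstep, PySem.List.sum_map_add_int, ih (fun p hp => hP p (List.mem_cons_of_mem _ hp))]
    rw [List.countP_cons]
    by_cases hbx : x = b
    · subst hbx
      have h2 : (List.range friends.length).map (fun j => if a = friends.getD j "" ∧ x = x then (1:Int) else 0)
          = (List.range friends.length).map (fun j => if a = friends.getD j "" then (1:Int) else 0) := by
        apply List.map_congr_left; intro j _
        simp
      rw [h2, pvOccEq' friends hnd a ha]
      simp only [beq_self_eq_true, if_true]
      push_cast
      ring
    · have h2 : (List.range friends.length).map (fun j => if a = friends.getD j "" ∧ x = b then (1:Int) else 0)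
          = (List.range friends.length).map (fun _ => (0:Int)) := by
        apply List.map_congr_left; intro j _
        simp [hbx]
      rw [h2]
      have h3 : ((b == x) = false) := beq_eq_false_iff_ne.mpr (fun he => hbx he.symm)
      simp [h3]

theorem pvUpd_length (t : List (List Int)) (gi ti : Nat) :
    (pvUpd t gi ti).length = t.length := PySem.List.length_pySetD t _ _

theorem pvUpd_row_length (t : List (List Int)) (gi ti : Nat) (hgi : gi < t.length) (i : Nat)
    (_hi : i < t.length) :
    ((pvUpd t gi ti).getD i []).length = (t.getD i []).length := by
  unfold pvUpd
  rw [← PySem.List.pyGetD_natCast (PySem.List.pySetD t ↑gi _) i []]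
  rw [PySem.List.pyGetD_pySetD_natCast t gi i _ [] hgi]
  by_cases h : i = gi
  · subst h
    rw [if_pos rfl, PySem.List.length_pySetD, PySem.List.pyGetD_natCast]
  · rw [if_neg h, PySem.List.pyGetD_natCast]

theorem pvUpd_entry (t : List (List Int)) (gi ti : Nat) (hgi : gi < t.length)
    (hti : ti < (t.getD gi []).length) (i j : Nat) :
    ((pvUpd t gi ti).getD i []).getD j 0
      = (t.getD i []).getD j 0 + (if i = gi ∧ j = ti then (1 : Int) else 0) := by
  unfold pvUpd
  rw [← PySem.List.pyGetD_natCast (PySem.List.pySetD t ↑gi _) i []]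
  rw [PySem.List.pyGetD_pySetD_natCast t gi i _ [] hgi]
  by_cases h : i = gi
  · subst h
    rw [if_pos rfl]
    rw [← PySem.List.pyGetD_natCast (PySem.List.pySetD (PySem.List.pyGetD t ↑i []) ↑ti _) j 0]
    rw [PySem.List.pyGetD_natCast t i []]
    rw [PySem.List.pyGetD_pySetD_natCast (t.getD i []) ti j _ 0 hti]
    by_cases hj : j = ti
    · subst hj
      rw [if_pos rfl, if_pos ⟨rfl, rfl⟩, PySem.List.pyGetD_natCast]
    · rw [if_neg hj, if_neg (fun hc => hj hc.2), PySem.List.pyGetD_natCast]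
      simp
  · rw [if_neg h, if_neg (fun hc => h hc.1), PySem.List.pyGetD_natCast]
    simp

theorem pvParse_mem (friends : List String) (g : String)
    (hg : (PySem.Str.split₀ g).length = 2 ∧ ∀ s ∈ PySem.Str.split₀ g, s ∈ friends) :
    (pvParse g).1 ∈ friends ∧ (pvParse g).2 ∈ friends := by
  obtain ⟨h2, hm⟩ := hg
  match hsp : PySem.Str.split₀ g with
  | [a, b] =>
    have ha : a ∈ friends := hm _ (by rw [hsp]; exact List.mem_cons_self)
    have hb : b ∈ friends := hm _ (by rw [hsp]; exact List.mem_cons_of_mem _ List.mem_cons_self)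
    constructor <;> simp [pvParse, hsp, ha, hb]
  | [] | [_] | _ :: _ :: _ :: _ => rw [hsp] at h2; simp at h2

theorem pvTableAux (friends : List String) (hnd : friends.Nodup) :
    ∀ (gs : List String) (t : List (List Int)),
    (∀ g ∈ gs, (PySem.Str.split₀ g).length = 2 ∧ ∀ s ∈ PySem.Str.split₀ g, s ∈ friends) →
    t.length = friends.length → (∀ i, i < friends.length → (t.getD i []).length = friends.length) →
    (gs.foldl (fun t g => pvUpd t (friends.idxOf (pvParse g).1) (friends.idxOf (pvParse g).2)) t).length = friends.length ∧
    (∀ i, i < friends.length →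
      ((gs.foldl (fun t g => pvUpd t (friends.idxOf (pvParse g).1) (friends.idxOf (pvParse g).2)) t).getD i []).length = friends.length) ∧
    ∀ i, i < friends.length → ∀ j, j < friends.length →
      ((gs.foldl (fun t g => pvUpd t (friends.idxOf (pvParse g).1) (friends.idxOf (pvParse g).2)) t).getD i []).getD j 0
        = (t.getD i []).getD j 0 + ((pvP gs).count (friends.getD i "", friends.getD j "") : Int) := by
  intro gs
  induction gs with
  | nil => intro t _ hlen hrow; refine ⟨hlen, hrow, ?_⟩; intro i _ j _; simp [pvP]
  | cons g gs ih =>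
    intro t hg hlen hrow
    have hgm := pvParse_mem friends g (hg g List.mem_cons_self)
    set a := (pvParse g).1
    set b := (pvParse g).2
    have hgi : friends.idxOf a < friends.length := pvIdx_lt friends a hgm.1
    have hti : friends.idxOf b < friends.length := pvIdx_lt friends b hgm.2
    set t' := pvUpd t (friends.idxOf a) (friends.idxOf b) with ht'
    have hlen' : t'.length = friends.length := by rw [ht', pvUpd_length, hlen]
    have hrow' : ∀ i, i < friends.length → (t'.getD i []).length = friends.length := by
      intro i hi
      rw [ht', pvUpd_row_length t _ _ (by omega) i (by omega)]
      exact hrow i hi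
    obtain ⟨c1, c2, c3⟩ := ih t' (fun g' hg' => hg g' (List.mem_cons_of_mem _ hg')) hlen' hrow'
    rw [List.foldl_cons]
    refine ⟨c1, c2, ?_⟩
    intro i hi j hj
    rw [c3 i hi j hj]
    have hab : pvParse g = (a, b) := rfl
    have hcount : ((pvP (g :: gs)).count (friends.getD i "", friends.getD j "") : Int)
        = ((pvP gs).count (friends.getD i "", friends.getD j "") : Int)
          + (if a = friends.getD i "" ∧ friends.getD j "" = b then (1:Int) else 0) := by
      show (((a, b) :: pvP gs).count (friends.getD i "", friends.getD j "") : Int) = _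
      exact pvCountCons (pvP gs) a b (friends.getD i "") (friends.getD j "")
    rw [hcount, ht', pvUpd_entry t _ _ (by omega) (by rw [hrow _ hgi]; omega) i j]
    have hiff1 : (friends.getD i "" = a) ↔ (i = friends.idxOf a) := pvIdx_eq_iff friends hnd a hgm.1 i hi
    have hiff2 : (friends.getD j "" = b) ↔ (j = friends.idxOf b) := pvIdx_eq_iff friends hnd b hgm.2 j hj
    by_cases h1 : i = friends.idxOf a <;> by_cases h2 : j = friends.idxOf b
    · rw [if_pos ⟨h1, h2⟩, if_pos ⟨(hiff1.mpr h1).symm, hiff2.mpr h2⟩]; ring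
    · rw [if_neg (fun hc => h2 hc.2), if_neg (fun hc => h2 (hiff2.mp hc.2))]; ring
    · rw [if_neg (fun hc => h1 hc.1), if_neg (fun hc => h1 (hiff1.mp hc.1.symm))]; ring
    · rw [if_neg (fun hc => h1 hc.1), if_neg (fun hc => h1 (hiff1.mp hc.1.symm))]; ring


theorem pvTable_eq (friends gifts : List String) (hnd : friends.Nodup)
    (hg : ∀ g ∈ gifts, (PySem.Str.split₀ g).length = 2 ∧ ∀ s ∈ PySem.Str.split₀ g, s ∈ friends) :
    gifts.foldl (fun t g => pvUpd t (friends.idxOf (pvParse g).1) (friends.idxOf (pvParse g).2))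
      ((List.range friends.length).map (fun _ => (List.range friends.length).map (fun _ => (0:Int))))
      = pvTbl friends (pvP gifts) := by
  have ht0len : ((List.range friends.length).map
      (fun _ => (List.range friends.length).map (fun _ => (0:Int)))).length = friends.length := by simp
  have ht0row : ∀ i, i < friends.length →
      (((List.range friends.length).map
        (fun _ => (List.range friends.length).map (fun _ => (0:Int)))).getD i []).length = friends.length := by
    intro i hi
    rw [PySem.List.getD_map_range _ _ _ _ hi]
    simp
  obtain ⟨c1, c2, c3⟩ := pvTableAux friends hnd gifts _ hg ht0len ht0row
  apply List.ext_getElem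
  · rw [c1]; simp [pvTbl]
  · intro i h1 h2
    have hi : i < friends.length := by rwa [c1] at h1
    rw [← List.getD_eq_getElem _ [] h1, ← List.getD_eq_getElem _ [] h2]
    have hrhs : (pvTbl friends (pvP gifts)).getD i []
        = (List.range friends.length).map (fun j => ((pvP gifts).count (friends.getD i "", friends.getD j "") : Int)) := by
      unfold pvTbl
      rw [PySem.List.getD_map_range _ _ _ _ hi]
    rw [hrhs]
    apply List.ext_getElem
    · rw [c2 i hi]; simp
    · intro j hj1 hj2
      have hj : j < friends.length := by rwa [c2 i hi] at hj1
      rw [← List.getD_eq_getElem _ 0 hj1, ← List.getD_eq_getElem _ 0 hj2]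
      rw [c3 i hi j hj]
      rw [PySem.List.getD_map_range _ _ _ _ hi, PySem.List.getD_map_range _ _ _ _ hj,
        PySem.List.getD_map_range _ _ _ _ hj]
      simp

theorem pvLoop (friends : List String) (P : List (String × String)) :
    ∀ (L : List (Nat × Nat)) (p : List Int), p.length = friends.length →
    (∀ ij ∈ L, ij.1 < friends.length ∧ ij.2 < friends.length) →
    (L.foldl (fun p ij => pvStep friends P p ij.1 ij.2) p).length = friends.length ∧
    ∀ k, k < friends.length →
      (L.foldl (fun p ij => pvStep friends P p ij.1 ij.2) p).getD k 0
        = p.getD k 0 + (L.countP (pvPred friends P k) : Int) := by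
  intro L
  induction L with
  | nil => intro p hp _; refine ⟨hp, ?_⟩; intro k _; simp
  | cons ij rest ih =>
    intro p hp hmem
    obtain ⟨i, j⟩ := ij
    have hij := hmem (i, j) List.mem_cons_self
    have hi : i < friends.length := hij.1
    have hj : j < friends.length := hij.2
    rw [List.foldl_cons]
    have hstep : ∀ (p' : List Int), p'.length = friends.length →
        (pvStep friends P p' i j).length = friends.length ∧
        ∀ k, k < friends.length →
          (pvStep friends P p' i j).getD k 0
            = p'.getD k 0 + (if pvPred friends P k (i, j) = true then (1:Int) else 0) := by
      intro p' hp'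
      unfold pvStep
      by_cases hb1 : pvBt P (friends.getD i "") (friends.getD j "")
      · rw [if_pos hb1]
        have hb2 : ¬ pvBt P (friends.getD j "") (friends.getD i "") := pvBt_asymm P _ _ hb1
        refine ⟨by rw [PySem.List.length_pySetD]; exact hp', ?_⟩
        intro k hk
        have hpred : pvPred friends P k (i, j) = decide (i = k) := by
          unfold pvPred
          rw [decide_eq_true hb1, decide_eq_false hb2, Bool.and_true, Bool.and_false, Bool.or_false]
        rw [hpred]
        rw [← PySem.List.pyGetD_natCast (PySem.List.pySetD p' ↑i _) k 0,
          PySem.List.pyGetD_pySetD_natCast p' i k _ 0 (by omega)]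
        by_cases hki : k = i
        · subst hki
          rw [if_pos rfl, if_pos (by rw [decide_eq_true rfl]), PySem.List.pyGetD_natCast]
        · rw [if_neg hki, if_neg (by rw [decide_eq_false (fun h => hki h.symm)]; simp),
            PySem.List.pyGetD_natCast]
          ring
      · rw [if_neg hb1]
        by_cases hb2 : pvBt P (friends.getD j "") (friends.getD i "")
        · rw [if_pos hb2]
          refine ⟨by rw [PySem.List.length_pySetD]; exact hp', ?_⟩
          intro k hk
          have hpred : pvPred friends P k (i, j) = decide (j = k) := by
            unfold pvPred
            rw [decide_eq_true hb2, decide_eq_false hb1, Bool.and_true, Bool.and_false, Bool.false_or]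
          rw [hpred]
          rw [← PySem.List.pyGetD_natCast (PySem.List.pySetD p' ↑j _) k 0,
            PySem.List.pyGetD_pySetD_natCast p' j k _ 0 (by omega)]
          by_cases hkj : k = j
          · subst hkj
            rw [if_pos rfl, if_pos (by rw [decide_eq_true rfl]), PySem.List.pyGetD_natCast]
          · rw [if_neg hkj, if_neg (by rw [decide_eq_false (fun h => hkj h.symm)]; simp),
              PySem.List.pyGetD_natCast]
            ring
        · rw [if_neg hb2]
          refine ⟨hp', ?_⟩
          intro k hk
          have hpred : pvPred friends P k (i, j) = false := by
            unfold pvPred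
            rw [decide_eq_false hb1, decide_eq_false hb2, Bool.and_false, Bool.and_false, Bool.or_false]
          rw [hpred]
          simp
    obtain ⟨hs1, hs2⟩ := hstep p hp
    obtain ⟨c1, c2⟩ := ih (pvStep friends P p i j) hs1 (fun q hq => hmem q (List.mem_cons_of_mem _ hq))
    refine ⟨c1, ?_⟩
    intro k hk
    rw [c2 k hk, hs2 k hk, List.countP_cons]
    by_cases hpk : pvPred friends P k (i, j) = true <;> simp [hpk] <;> ring

theorem pvCountP_flatMap {α β : Type} (g : α → List β) (l : List α) (q : β → Bool) :
    (l.flatMap g).countP q = (l.map (fun x => (g x).countP q)).sum := by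
  induction l with
  | nil => simp
  | cons x t ih => rw [List.flatMap_cons, List.countP_append, ih]; simp

theorem pvCountP_range_shift (a k : Nat) (q : Nat → Bool) :
    ∀ (m : Nat), (List.range m).countP (fun t => decide (a + t = k) && q t)
      = if a ≤ k ∧ k < a + m ∧ q (k - a) = true then 1 else 0 := by
  intro m
  induction m with
  | zero =>
    rw [List.range_zero, List.countP_nil, if_neg]
    rintro ⟨h1, h2, h3⟩
    omega
  | succ m ihm =>
    rw [List.range_succ, List.countP_append, ihm]
    have hsing : List.countP (fun t => decide (a + t = k) && q t) [m]
        = if (a + m = k) ∧ q m = true then 1 else 0 := by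
      by_cases hh : a + m = k <;> by_cases hq : q m = true <;> simp [hh, hq]
    rw [hsing]
    by_cases hh : a + m = k
    · obtain rfl : k = a + m := hh.symm
      have hma : a + m - a = m := by omega
      have e1 : ¬ (a ≤ a + m ∧ a + m < a + m ∧ q (a + m - a) = true) := by
        rintro ⟨h1, h2, h3⟩; omega
      by_cases hq : q m = true
      · rw [if_neg e1, if_pos ⟨rfl, hq⟩, if_pos ⟨by omega, by omega, by simpa [hma] using hq⟩]
      · rw [if_neg e1, if_neg (fun hc => hq hc.2),
          if_neg (fun hc => hq (by simpa [hma] using hc.2.2))]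
    · by_cases h2 : a ≤ k ∧ k < a + m ∧ q (k - a) = true
      · rw [if_pos h2, if_neg (fun hc => hh hc.1), if_pos ⟨h2.1, by omega, h2.2.2⟩]
      · rw [if_neg h2, if_neg (fun hc => hh hc.1),
          if_neg (fun hc => h2 ⟨hc.1, by omega, hc.2.2⟩)]

theorem pvMaxEq (p : List Int) (N : Nat) (hN : N ≠ 0) (hl : p.length = N) (v : Nat → Nat)
    (hv : ∀ k, k < N → p.getD k 0 = (v k : Int)) :
    (PySem.List.max? p (fun x => x)).getD 0
      = (List.range N).foldl (fun b k => max b ((v k : Nat) : Int)) 0 := by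
  have hp : p = (List.range N).map (fun k => ((v k : Nat) : Int)) := by
    apply List.ext_getElem
    · simp [hl]
    · intro i h1 h2
      have hi : i < N := by rwa [hl] at h1
      rw [← List.getD_eq_getElem _ 0 h1, hv i hi]
      rw [List.getElem_map, List.getElem_range]
  rw [hp]
  obtain ⟨m, rfl⟩ := Nat.exists_eq_succ_of_ne_zero hN
  rw [List.range_succ_eq_map]
  rw [List.map_cons, List.foldl_cons, PySem.List.max?_id_cons]
  simp only [Option.getD_some]
  have h0 : max (0 : Int) ((v 0 : Nat) : Int) = ((v 0 : Nat) : Int) :=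
    max_eq_right (Int.natCast_nonneg _)
  rw [h0, List.map_map, List.foldl_map, List.foldl_map]
  rfl

theorem pvSumIteP {α : Type} (p : α → Prop) [DecidablePred p] (l : List α) :
    (l.map (fun x => if p x then (1 : Nat) else 0)).sum = l.countP (fun x => decide (p x)) := by
  induction l with
  | nil => simp
  | cons x t ih =>
    rw [List.map_cons, List.sum_cons, ih, List.countP_cons]
    by_cases h : p x <;> simp [h] <;> omega

theorem pvCount_pairs (friends : List String) (P : List (String × String)) (k : Nat)
    (hk : k < friends.length) :
    (pvPairs friends.length).countP (pvPred friends P k) = pvW friends P k := by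
  unfold pvPairs pvW
  rw [pvCountP_flatMap]
  have hc_lt : ∀ i, i < k →
      ((List.range (friends.length - (i+1))).map (fun t => (i, i+1+t))).countP (pvPred friends P k)
        = if pvBt P (friends.getD k "") (friends.getD i "") then 1 else 0 := by
    intro i hik
    rw [List.countP_map]
    have hcongr : ∀ t ∈ List.range (friends.length - (i+1)),
        (pvPred friends P k ∘ (fun t => (i, i+1+t))) t = true
          ↔ (fun t => decide (i + 1 + t = k)
              && decide (pvBt P (friends.getD (i+1+t) "") (friends.getD i ""))) t = true := by
      intro t _
      unfold pvPred
      simp only [Function.comp]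
      rw [decide_eq_false (by omega : ¬ i = k)]
      simp
    rw [List.countP_congr hcongr, pvCountP_range_shift (i+1) k _ (friends.length - (i+1))]
    have hkk : i + 1 + (k - (i + 1)) = k := by omega
    rw [hkk]
    by_cases hb : pvBt P (friends.getD k "") (friends.getD i "")
    · rw [if_pos ⟨by omega, by omega, decide_eq_true hb⟩, if_pos hb]
    · rw [if_neg (fun hc => hb (of_decide_eq_true hc.2.2)), if_neg hb]
  have hc_gt : ∀ i, k < i →
      ((List.range (friends.length - (i+1))).map (fun t => (i, i+1+t))).countP (pvPred friends P k)
        = 0 := by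
    intro i hik
    rw [List.countP_map]
    apply List.countP_eq_zero.mpr
    intro t _
    unfold pvPred
    simp only [Function.comp]
    rw [decide_eq_false (by omega : ¬ i = k), decide_eq_false (by omega : ¬ i + 1 + t = k)]
    simp
  have hc_k : ((List.range (friends.length - (k+1))).map (fun t => (k, k+1+t))).countP (pvPred friends P k)
      = (List.range (friends.length - (k+1))).countP
          (fun t => decide (pvBt P (friends.getD k "") (friends.getD (k+1+t) ""))) := by
    rw [List.countP_map]
    apply List.countP_congr
    intro t _
    unfold pvPred
    simp only [Function.comp]
    rw [decide_eq_false (by omega : ¬ k + 1 + t = k)]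
    simp
  have hsplit2 : List.range friends.length
      = List.range k ++ k :: (List.range (friends.length - (k+1))).map (fun t => k+1+t) := by
    have h1 : List.range friends.length
        = List.range k ++ ((List.range (friends.length - k)).map (k + ·)) := by
      rw [← List.range_add]; congr 1; omega
    have hNk : friends.length - k = (friends.length - k - 1) + 1 := by omega
    rw [h1, hNk, List.range_succ_eq_map, List.map_cons, List.map_map]
    have hsub : friends.length - k - 1 = friends.length - (k + 1) := by omega
    rw [hsub]
    congr 1
    rw [Nat.add_zero]
    congr 1
    apply List.map_congr_left
    intro t _
    simp only [Function.comp]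
    omega
  rw [hsplit2]
  rw [List.map_append, List.map_cons, List.map_map, List.sum_append, List.sum_cons]
  rw [List.countP_append, List.countP_cons]
  -- left parts over range k
  have hleft : ((List.range k).map (fun i =>
      ((List.range (friends.length - (i+1))).map (fun t => (i, i+1+t))).countP (pvPred friends P k))).sum
      = (List.range k).countP (fun j => decide (j ≠ k)
          && decide (pvBt P (friends.getD k "") (friends.getD j ""))) := by
    have h1 : (List.range k).map (fun i =>
        ((List.range (friends.length - (i+1))).map (fun t => (i, i+1+t))).countP (pvPred friends P k))
        = (List.range k).map (fun i => if pvBt P (friends.getD k "") (friends.getD i "") then 1 else 0) := by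
      apply List.map_congr_left
      intro i hi
      exact hc_lt i (List.mem_range.mp hi)
    rw [h1, pvSumIteP]
    apply List.countP_congr
    intro j hj
    have hjk : j ≠ k := by have := List.mem_range.mp hj; omega
    rw [decide_eq_true hjk, Bool.true_and]
  rw [hleft, hc_k]
  -- tail of the flat-map sum is zero
  have htail : ((List.range (friends.length - (k+1))).map ((fun i =>
      ((List.range (friends.length - (i+1))).map (fun t => (i, i+1+t))).countP (pvPred friends P k))
        ∘ (fun t => k+1+t))).sum = 0 := by
    have h1 : (List.range (friends.length - (k+1))).map ((fun i =>
        ((List.range (friends.length - (i+1))).map (fun t => (i, i+1+t))).countP (pvPred friends P k))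
          ∘ (fun t => k+1+t))
        = (List.range (friends.length - (k+1))).map (fun _ => 0) := by
      apply List.map_congr_left
      intro t _
      simp only [Function.comp]
      exact hc_gt (k+1+t) (by omega)
    rw [h1]
    simp
  rw [htail]
  have htailw : ((List.range (friends.length - (k+1))).map (fun t => k+1+t)).countP
      (fun j => decide (j ≠ k) && decide (pvBt P (friends.getD k "") (friends.getD j "")))
      = (List.range (friends.length - (k+1))).countP
          (fun t => decide (pvBt P (friends.getD k "") (friends.getD (k+1+t) ""))) := by
    rw [List.countP_map]
    apply List.countP_congr
    intro t _
    simp only [Function.comp]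
    rw [decide_eq_true (by omega : k+1+t ≠ k), Bool.true_and]
  have hmidw : (decide (k ≠ k) && decide (pvBt P (friends.getD k "") (friends.getD k ""))) = false := by
    simp
  rw [hmidw, htailw]
  simp

theorem pvStepRaw (P : List (String × String)) (p : List Int) (x y : String) (i j : Nat) :
    (if (P.count (x, y) : Int) > P.count (y, x) then
        PySem.List.pySetD p ↑i (PySem.List.pyGetD p ↑i 0 + 1)
      else if (P.count (x, y) : Int) < P.count (y, x) then
        PySem.List.pySetD p ↑j (PySem.List.pyGetD p ↑j 0 + 1)
      else if pvR P x > pvR P y then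
        PySem.List.pySetD p ↑i (PySem.List.pyGetD p ↑i 0 + 1)
      else if pvR P x < pvR P y then
        PySem.List.pySetD p ↑j (PySem.List.pyGetD p ↑j 0 + 1)
      else p)
    = (if pvBt P x y then PySem.List.pySetD p ↑i (PySem.List.pyGetD p ↑i 0 + 1)
       else if pvBt P y x then PySem.List.pySetD p ↑j (PySem.List.pyGetD p ↑j 0 + 1)
       else p) := by
  unfold pvBt
  split_ifs <;> first | rfl | omega

theorem pvPairs_mem (N : Nat) : ∀ ij ∈ pvPairs N, ij.1 < N ∧ ij.2 < N := by
  intro ij hij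
  unfold pvPairs at hij
  rw [List.mem_flatMap] at hij
  obtain ⟨k, hk, hm⟩ := hij
  rw [List.mem_map] at hm
  obtain ⟨t, ht, rfl⟩ := hm
  have hk' := List.mem_range.mp hk
  have ht' := List.mem_range.mp ht
  exact ⟨by omega, by omega⟩

theorem pvA_eq_NF (friends gifts : List String) (hne : friends ≠ []) (hnd : friends.Nodup)
    (hg : ∀ g ∈ gifts, (PySem.Str.split₀ g).length = 2 ∧ ∀ t ∈ PySem.Str.split₀ g, t ∈ friends) :
    solution friends gifts = pvNF friends (pvP gifts) := by
  have hPfst : ∀ p ∈ pvP gifts, p.1 ∈ friends := by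
    intro p hp
    rw [pvP, List.mem_map] at hp
    obtain ⟨g, hgm, rfl⟩ := hp
    exact (pvParse_mem friends g (hg g hgm)).1
  have hPsnd : ∀ p ∈ pvP gifts, p.2 ∈ friends := by
    intro p hp
    rw [pvP, List.mem_map] at hp
    obtain ⟨g, hgm, rfl⟩ := hp
    exact (pvParse_mem friends g (hg g hgm)).2
  have hdic : ∀ x ∈ friends,
      ((PySem.List.enumerate friends 0).foldl (fun (d : PySem.Dict String Int) p => d.insert p.2 p.1) ∅).getD x 0
        = (friends.idxOf x : Int) := by
    intro x hx
    rw [pvDic_mem friends 0 ∅ x hnd hx, zero_add]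
  simp only [solution, PySem.List.len_eq]
  -- step 1: the gift-table fold is the count matrix
  have ht0 : (List.map (fun _ => List.map (fun _ => (0:Int)) (PySem.List.pyRange 0 (friends.length : Int)))
        (PySem.List.pyRange 0 (friends.length : Int)))
      = (List.range friends.length).map (fun _ => (List.range friends.length).map (fun _ => (0:Int))) := by
    simp only [PySem.List.pyRange_zero_nat, List.map_map]
    rfl
  have htable : gifts.foldl (fun t g =>
      match PySem.Str.split₀ g with
      | [give, take] =>
        PySem.List.pySetD t
          (((PySem.List.enumerate friends 0).foldl (fun (d : PySem.Dict String Int) p => d.insert p.2 p.1) ∅).getD give 0)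
          (PySem.List.pySetD
            (PySem.List.pyGetD t
              (((PySem.List.enumerate friends 0).foldl (fun (d : PySem.Dict String Int) p => d.insert p.2 p.1) ∅).getD give 0) [])
            (((PySem.List.enumerate friends 0).foldl (fun (d : PySem.Dict String Int) p => d.insert p.2 p.1) ∅).getD take 0)
            (PySem.List.pyGetD
              (PySem.List.pyGetD t
                (((PySem.List.enumerate friends 0).foldl (fun (d : PySem.Dict String Int) p => d.insert p.2 p.1) ∅).getD give 0) [])
              (((PySem.List.enumerate friends 0).foldl (fun (d : PySem.Dict String Int) p => d.insert p.2 p.1) ∅).getD take 0) 0 + 1))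
      | _ => t)
      (List.map (fun _ => List.map (fun _ => (0:Int)) (PySem.List.pyRange 0 (friends.length : Int)))
        (PySem.List.pyRange 0 (friends.length : Int)))
      = pvTbl friends (pvP gifts) := by
    rw [ht0]
    rw [PySem.List.foldl_congr_mem gifts _
      (fun t g => pvUpd t (friends.idxOf (pvParse g).1) (friends.idxOf (pvParse g).2)) _ ?_]
    · exact pvTable_eq friends gifts hnd hg
    · intro t g hgm
      obtain ⟨h2, hmem⟩ := hg g hgm
      match hsp : PySem.Str.split₀ g with
      | [a, b] =>
        have ha : a ∈ friends := hmem _ (by rw [hsp]; exact List.mem_cons_self)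
        have hb : b ∈ friends := hmem _ (by rw [hsp]; exact List.mem_cons_of_mem _ List.mem_cons_self)
        have hp1 : (pvParse g).1 = a := by simp [pvParse, hsp]
        have hp2 : (pvParse g).2 = b := by simp [pvParse, hsp]
        simp only [hsp]
        rw [hdic a ha, hdic b hb, hp1, hp2]
        rfl
      | [] | [_] | _ :: _ :: _ :: _ => rw [hsp] at h2; simp at h2
  simp only [htable]
  -- step 2: the rate list
  have hrate : (PySem.List.pyRange 0 (friends.length : Int)).foldl (fun r i =>
        r ++ [(PySem.List.pyGetD (pvTbl friends (pvP gifts)) i []).sum -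
          (PySem.List.pyRange 0 (friends.length : Int)).foldl
            (fun c j => c + PySem.List.pyGetD (PySem.List.pyGetD (pvTbl friends (pvP gifts)) j []) i 0) 0]) []
      = (List.range friends.length).map (fun k => pvR (pvP gifts) (friends.getD k "")) := by
    rw [PySem.List.foldl_append_singleton_eq_map, List.nil_append, PySem.List.pyRange_zero_nat,
      List.map_map]
    apply List.map_congr_left
    intro k hkm
    have hk : k < friends.length := List.mem_range.mp hkm
    simp only [Function.comp]
    have hrow : PySem.List.pyGetD (pvTbl friends (pvP gifts)) (k : Int) []
        = (List.range friends.length).map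
            (fun j => ((pvP gifts).count (friends.getD k "", friends.getD j "") : Int)) := by
      rw [PySem.List.pyGetD_natCast]
      unfold pvTbl
      rw [PySem.List.getD_map_range _ _ _ _ hk]
    rw [hrow, PySem.List.foldl_add, zero_add]
    have hcol : List.map (fun j => PySem.List.pyGetD (PySem.List.pyGetD (pvTbl friends (pvP gifts)) j []) ((k : Nat) : Int) 0)
          (List.map (fun x => ((x : Nat) : Int)) (List.range friends.length))
        = (List.range friends.length).map
            (fun j => ((pvP gifts).count (friends.getD j "", friends.getD k "") : Int)) := by
      rw [List.map_map]
      apply List.map_congr_left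
      intro j hjm
      have hj : j < friends.length := List.mem_range.mp hjm
      simp only [Function.comp]
      rw [PySem.List.pyGetD_natCast (pvTbl friends (pvP gifts)) j []]
      unfold pvTbl
      rw [PySem.List.getD_map_range _ _ _ _ hj, PySem.List.pyGetD_natCast,
        PySem.List.getD_map_range _ _ _ _ hk]
    rw [hcol, pvSumCountFst friends hnd _ (pvP gifts) hPsnd,
      pvSumCountSnd friends hnd _ (pvP gifts) hPfst]
    rfl
  simp only [hrate]
  -- step 3: the presents loop
  have hrep : PySem.List.pyRepeat [(0:Int)] (friends.length : Int)
      = List.replicate friends.length (0:Int) := by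
    rw [PySem.List.pyRepeat_singleton]
    simp
  simp only [hrep]
  have hpres : (PySem.List.pyRange 0 (friends.length : Int)).foldl (fun p i =>
        (PySem.List.pyRange (i + 1) (friends.length : Int)).foldl (fun p j =>
          if PySem.List.pyGetD (PySem.List.pyGetD (pvTbl friends (pvP gifts)) i []) j 0 >
              PySem.List.pyGetD (PySem.List.pyGetD (pvTbl friends (pvP gifts)) j []) i 0 then
            PySem.List.pySetD p i (PySem.List.pyGetD p i 0 + 1)
          else if PySem.List.pyGetD (PySem.List.pyGetD (pvTbl friends (pvP gifts)) i []) j 0 <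
              PySem.List.pyGetD (PySem.List.pyGetD (pvTbl friends (pvP gifts)) j []) i 0 then
            PySem.List.pySetD p j (PySem.List.pyGetD p j 0 + 1)
          else if PySem.List.pyGetD ((List.range friends.length).map
                (fun k => pvR (pvP gifts) (friends.getD k ""))) i 0 >
              PySem.List.pyGetD ((List.range friends.length).map
                (fun k => pvR (pvP gifts) (friends.getD k ""))) j 0 then
            PySem.List.pySetD p i (PySem.List.pyGetD p i 0 + 1)
          else if PySem.List.pyGetD ((List.range friends.length).map
                (fun k => pvR (pvP gifts) (friends.getD k ""))) i 0 <
              PySem.List.pyGetD ((List.range friends.length).map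
                (fun k => pvR (pvP gifts) (friends.getD k ""))) j 0 then
            PySem.List.pySetD p j (PySem.List.pyGetD p j 0 + 1)
          else p) p)
        (List.replicate friends.length (0:Int))
      = (pvPairs friends.length).foldl
          (fun p ij => pvStep friends (pvP gifts) p ij.1 ij.2)
          (List.replicate friends.length (0:Int)) := by
    unfold pvPairs
    rw [List.foldl_flatMap, PySem.List.pyRange_zero_nat, List.foldl_map]
    apply PySem.List.foldl_congr_mem
    intro p k hkm
    have hk : k < friends.length := List.mem_range.mp hkm
    rw [List.foldl_map, PySem.List.pyRange_one]
    have hcnt : (((friends.length : Int)) - ((k : Int) + 1)).toNat = friends.length - (k + 1) := by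
      omega
    rw [hcnt, List.foldl_map]
    apply PySem.List.foldl_congr_mem
    intro q t htm
    have ht : t < friends.length - (k + 1) := List.mem_range.mp htm
    have hj : ((k : Int) + 1 + (t : Int)) = (((k + 1 + t : Nat) : Int)) := by push_cast; ring
    rw [hj]
    have hjlt : k + 1 + t < friends.length := by omega
    have hE : ∀ (u v : Nat), u < friends.length → v < friends.length →
        PySem.List.pyGetD (PySem.List.pyGetD (pvTbl friends (pvP gifts)) (u : Int) []) (v : Int) 0
          = ((pvP gifts).count (friends.getD u "", friends.getD v "") : Int) := by
      intro u v hu hv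
      rw [PySem.List.pyGetD_natCast (pvTbl friends (pvP gifts)) u []]
      unfold pvTbl
      rw [PySem.List.getD_map_range _ _ _ _ hu, PySem.List.pyGetD_natCast,
        PySem.List.getD_map_range _ _ _ _ hv]
    have hR : ∀ (u : Nat), u < friends.length →
        PySem.List.pyGetD ((List.range friends.length).map
          (fun k => pvR (pvP gifts) (friends.getD k ""))) (u : Int) 0
          = pvR (pvP gifts) (friends.getD u "") := by
      intro u hu
      rw [PySem.List.pyGetD_natCast, PySem.List.getD_map_range _ _ _ _ hu]
    rw [hE k (k+1+t) hk hjlt, hE (k+1+t) k hjlt hk, hR k hk, hR (k+1+t) hjlt]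
    exact pvStepRaw (pvP gifts) q (friends.getD k "") (friends.getD (k+1+t) "") k (k+1+t)
  simp only [hpres]
  -- step 4: read off the final list and take the maximum
  obtain ⟨hlen, hget⟩ := pvLoop friends (pvP gifts) (pvPairs friends.length)
    (List.replicate friends.length (0:Int)) (by simp) (pvPairs_mem friends.length)
  have hN0 : friends.length ≠ 0 := fun h => hne (List.eq_nil_of_length_eq_zero h)
  exact pvMaxEq _ friends.length hN0 hlen (pvW friends (pvP gifts)) (fun k hk => by
    rw [hget k hk, List.getD_replicate _ hk, pvCount_pairs friends (pvP gifts) k hk, zero_add])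

-- ===== VERDICT (by name: the statement is the Claim_ definition above) =====
theorem solution_spec : Claim_equal_solution := by
  intro friends gifts _hDom hPre
  obtain ⟨hne, hnd, hg⟩ := hPre
  unfold Spec_solution
  rw [pvA_eq_NF friends gifts hne hnd hg, pvB_eq_NF friends gifts (fun g hgm => (hg g hgm).1)]
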